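-- pv_equiv track=rewrite | github.com/thynaptic/oricli-alpha | mavaia_core/evaluation/test_runner.py | _categorize_module
-- ===== SOURCE A (Python) =====
-- def _categorize_module(module_name: str, description: str) -> str:
--     """
--     Categorize a module by type based on name and description
--
--     Args:
--         module_name: Module name
--         description: Module description
--
--     Returns:
--         Category name
--     """
--     name_lower = module_name.lower()
--     desc_lower = description.lower()
--
--     # Reasoning modules
--     if any(keyword in name_lower for keyword in ["reasoning", "cot", "mcts", "chain", "thought", "logic", "deduction", "inference"]):
--         return "Reasoning"
--
--     # Memory modules
--     if any(keyword in name_lower for keyword in ["memory", "recall", "remember", "storage", "persist"]):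
--         return "Memory"
--
--     # Language/NLP modules
--     if any(keyword in name_lower for keyword in ["nlp", "linguistic", "language", "text", "embedding", "conversation", "personality", "response"]):
--         return "Language & NLP"
--
--     # Safety modules
--     if any(keyword in name_lower for keyword in ["safety", "threat", "security", "mental_health", "emotional_distress"]):
--         return "Safety & Security"
--
--     # Tool modules
--     if any(keyword in name_lower for keyword in ["tool", "web", "search", "fetch", "scraper", "code_execution", "url"]):
--         return "Tools & Integration"
--
--     # System/Infrastructure modules
--     if any(keyword in name_lower for keyword in ["orchestrator", "registry", "coordinator", "pipeline", "agent", "service"]):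
--         return "System & Infrastructure"
--
--     # Planning/Optimization modules
--     if any(keyword in name_lower for keyword in ["plan", "optimizer", "optimization", "gradient", "model_optimizer"]):
--         return "Planning & Optimization"
--
--     # Analysis modules
--     if any(keyword in name_lower for keyword in ["analysis", "analyzer", "analyze", "vision", "image", "document"]):
--         return "Analysis"
--
--     # Learning modules
--     if any(keyword in name_lower for keyword in ["learning", "reinforcement", "neural", "lora", "training"]):
--         return "Learning & Training"
--
--     # Creative modules
--     if any(keyword in name_lower for keyword in ["creative", "writing", "generation", "cognitive_generator"]):
--         return "Creative & Generation"
--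
--     # Default category
--     return "Other"
-- ===== SOURCE B (Python) =====
-- _CATEGORIES = [
--     ("Reasoning", ["reasoning", "cot", "mcts", "chain", "thought", "logic", "deduction", "inference"]),
--     ("Memory", ["memory", "recall", "remember", "storage", "persist"]),
--     ("Language & NLP", ["nlp", "linguistic", "language", "text", "embedding", "conversation", "personality", "response"]),
--     ("Safety & Security", ["safety", "threat", "security", "mental_health", "emotional_distress"]),
--     ("Tools & Integration", ["tool", "web", "search", "fetch", "scraper", "code_execution", "url"]),
--     ("System & Infrastructure", ["orchestrator", "registry", "coordinator", "pipeline", "agent", "service"]),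
--     ("Planning & Optimization", ["plan", "optimizer", "optimization", "gradient", "model_optimizer"]),
--     ("Analysis", ["analysis", "analyzer", "analyze", "vision", "image", "document"]),
--     ("Learning & Training", ["learning", "reinforcement", "neural", "lora", "training"]),
--     ("Creative & Generation", ["creative", "writing", "generation", "cognitive_generator"]),
-- ]
--
-- # Flat (category, keyword) pairs scanned lowest priority FIRST: a later (higher
-- # priority) match simply overwrites the accumulator, so no early exit is needed.
-- _SCAN = [(cat, kw) for cat, kws in reversed(_CATEGORIES) for kw in kws]
--
-- def _categorize_module(module_name: str, description: str) -> str: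
--     name_lower = module_name.lower()
--     result = "Other"
--     for cat, kw in _SCAN:
--         if kw in name_lower:
--             result = cat
--     return result
-- ===== Notes on version B (the rewrite author's own statement) =====
-- stated objective: alternative
-- what changed: Replaced the first-match if/return cascade by a single flat scan over (category, keyword) pairs in ascending priority order with a last-write-wins accumulator (no early exit, no per-category any), dropping the unused desc_lower.
import Mathlib
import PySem

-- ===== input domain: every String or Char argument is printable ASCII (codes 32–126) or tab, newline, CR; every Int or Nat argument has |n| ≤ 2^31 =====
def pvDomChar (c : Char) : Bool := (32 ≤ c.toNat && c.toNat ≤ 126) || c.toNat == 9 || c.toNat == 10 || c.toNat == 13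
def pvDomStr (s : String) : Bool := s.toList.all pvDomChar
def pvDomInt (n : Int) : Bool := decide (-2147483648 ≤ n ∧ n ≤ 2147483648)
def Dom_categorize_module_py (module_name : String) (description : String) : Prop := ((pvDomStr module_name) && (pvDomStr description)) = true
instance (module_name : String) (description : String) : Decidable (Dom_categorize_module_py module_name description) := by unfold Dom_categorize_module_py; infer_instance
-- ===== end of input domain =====

-- B replaces A's first-match if/return cascade by one flat scan over (category, keyword) pairs in ascending priority order with a last-write-wins accumulator (alternative decomposition); the unused desc_lower is dropped.


-- ===== PORT A =====
def categorize_module_py (module_name : String) (description : String) : String :=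
  let name_lower := PySem.Str.lower module_name
  let _desc_lower := PySem.Str.lower description
  if ["reasoning", "cot", "mcts", "chain", "thought", "logic", "deduction", "inference"].any
      (fun kw => PySem.Str.isIn kw name_lower) then "Reasoning"
  else if ["memory", "recall", "remember", "storage", "persist"].any
      (fun kw => PySem.Str.isIn kw name_lower) then "Memory"
  else if ["nlp", "linguistic", "language", "text", "embedding", "conversation", "personality", "response"].any
      (fun kw => PySem.Str.isIn kw name_lower) then "Language & NLP"
  else if ["safety", "threat", "security", "mental_health", "emotional_distress"].any
      (fun kw => PySem.Str.isIn kw name_lower) then "Safety & Security"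
  else if ["tool", "web", "search", "fetch", "scraper", "code_execution", "url"].any
      (fun kw => PySem.Str.isIn kw name_lower) then "Tools & Integration"
  else if ["orchestrator", "registry", "coordinator", "pipeline", "agent", "service"].any
      (fun kw => PySem.Str.isIn kw name_lower) then "System & Infrastructure"
  else if ["plan", "optimizer", "optimization", "gradient", "model_optimizer"].any
      (fun kw => PySem.Str.isIn kw name_lower) then "Planning & Optimization"
  else if ["analysis", "analyzer", "analyze", "vision", "image", "document"].any
      (fun kw => PySem.Str.isIn kw name_lower) then "Analysis"
  else if ["learning", "reinforcement", "neural", "lora", "training"].any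
      (fun kw => PySem.Str.isIn kw name_lower) then "Learning & Training"
  else if ["creative", "writing", "generation", "cognitive_generator"].any
      (fun kw => PySem.Str.isIn kw name_lower) then "Creative & Generation"
  else "Other"

-- ===== PORT B =====
-- Source B's _CATEGORIES table (priority order)
def pvCategories : List (String × List String) :=
  [("Reasoning", ["reasoning", "cot", "mcts", "chain", "thought", "logic", "deduction", "inference"]),
   ("Memory", ["memory", "recall", "remember", "storage", "persist"]),
   ("Language & NLP", ["nlp", "linguistic", "language", "text", "embedding", "conversation", "personality", "response"]),
   ("Safety & Security", ["safety", "threat", "security", "mental_health", "emotional_distress"]),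
   ("Tools & Integration", ["tool", "web", "search", "fetch", "scraper", "code_execution", "url"]),
   ("System & Infrastructure", ["orchestrator", "registry", "coordinator", "pipeline", "agent", "service"]),
   ("Planning & Optimization", ["plan", "optimizer", "optimization", "gradient", "model_optimizer"]),
   ("Analysis", ["analysis", "analyzer", "analyze", "vision", "image", "document"]),
   ("Learning & Training", ["learning", "reinforcement", "neural", "lora", "training"]),
   ("Creative & Generation", ["creative", "writing", "generation", "cognitive_generator"])]

-- Source B's _SCAN: flat (category, keyword) pairs, lowest priority first
def pvScan : List (String × String) :=
  pvCategories.reverse.flatMap (fun p => p.2.map (fun kw => (p.1, kw)))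

def categorize_module_py_alt (module_name : String) (description : String) : String :=
  let name_lower := PySem.Str.lower module_name
  pvScan.foldl (fun result p => if PySem.Str.isIn p.2 name_lower then p.1 else result) "Other"

-- ===== PRECONDITION & SPEC =====
def Spec_categorize_module_py (module_name : String) (description : String) (out : String) : Prop := out = categorize_module_py_alt module_name description
instance (module_name : String) (description : String) (out : String) : Decidable (Spec_categorize_module_py module_name description out) := by unfold Spec_categorize_module_py; infer_instance

-- ===== CLAIM (what is proved, stated in full; the proofs are below) =====
def Claim_equal_categorize_module_py : Prop := ∀ (module_name : String) (description : String), Dom_categorize_module_py module_name description → Spec_categorize_module_py module_name description (categorize_module_py module_name description)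

-- ===== LEMMAS AND PROOFS =====

-- folding a constant-category keyword group over the last-write-wins step is the "if any matches" test
theorem pv_foldl_group (name cat : String) (kws : List String) (acc : String) :
    List.foldl (fun result p => if PySem.Str.isIn p.2 name then p.1 else result) acc
      (kws.map (fun kw => (cat, kw)))
    = if kws.any (fun kw => PySem.Str.isIn kw name) then cat else acc := by
  induction kws generalizing acc with
  | nil => simp
  | cons k ks ih =>
    simp only [List.map, List.foldl, List.any_cons, Bool.or_eq_true]
    rw [ih]
    split_ifs <;> tauto

-- _SCAN decomposed into its ten constant-category groups
theorem pv_scan_decomp :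
    pvScan =
      (["creative", "writing", "generation", "cognitive_generator"].map (fun kw => (("Creative & Generation" : String), kw)))
      ++ ((["learning", "reinforcement", "neural", "lora", "training"].map (fun kw => (("Learning & Training" : String), kw)))
      ++ ((["analysis", "analyzer", "analyze", "vision", "image", "document"].map (fun kw => (("Analysis" : String), kw)))
      ++ ((["plan", "optimizer", "optimization", "gradient", "model_optimizer"].map (fun kw => (("Planning & Optimization" : String), kw)))
      ++ ((["orchestrator", "registry", "coordinator", "pipeline", "agent", "service"].map (fun kw => (("System & Infrastructure" : String), kw)))
      ++ ((["tool", "web", "search", "fetch", "scraper", "code_execution", "url"].map (fun kw => (("Tools & Integration" : String), kw)))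
      ++ ((["safety", "threat", "security", "mental_health", "emotional_distress"].map (fun kw => (("Safety & Security" : String), kw)))
      ++ ((["nlp", "linguistic", "language", "text", "embedding", "conversation", "personality", "response"].map (fun kw => (("Language & NLP" : String), kw)))
      ++ ((["memory", "recall", "remember", "storage", "persist"].map (fun kw => (("Memory" : String), kw)))
      ++ (["reasoning", "cot", "mcts", "chain", "thought", "logic", "deduction", "inference"].map (fun kw => (("Reasoning" : String), kw))))))))))) := by
  rfl

-- ===== VERDICT (by name: the statement is the Claim_ definition above) =====
theorem categorize_module_py_spec : Claim_equal_categorize_module_py := by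
  intro module_name description _
  unfold Spec_categorize_module_py categorize_module_py categorize_module_py_alt
  rw [pv_scan_decomp]
  simp only [List.foldl_append, pv_foldl_group]
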